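-- pv_equiv track=rewrite | github.com/kangminchan99/coding_test_python | 괄호변환.py | parse
-- ===== SOURCE A (Python) =====
-- def parse(str):
--     correct = True
--     # 열린괄호
--     left = 0
--     # 닫힌 괄호
--     right = 0
--     mystack = []
--
--     for i in range(len(str)):
--         if str[i] == '(':
--             left += 1
--             mystack.append('(')
--         else:
--             right += 1
--             # 쌍이 안맞는경우
--             if len(mystack) == 0:
--                 correct = False
--             else:
--                 mystack.pop()
--
--         if left == right:
--             return i + 1, correct
--
--     return 0, False
-- ===== SOURCE B (Python) =====
-- def parse(str):
--     # phase 1: running-balance table (+1 for '(', -1 otherwise)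
--     bal = []
--     b = 0
--     for c in str:
--         b += 1 if c == '(' else -1
--         bal.append(b)
--     # phase 2: scan for the first zero balance, tracking the running minimum
--     lo = 0
--     for i, v in enumerate(bal):
--         lo = min(lo, v)
--         if v == 0:
--             return i + 1, lo >= 0
--     return 0, False
-- ===== Notes on version B (the rewrite author's own statement) =====
-- stated objective: alternative
-- what changed: Replaces the single stack-maintaining early-return pass with a two-phase decomposition: build the running-balance table first, then scan it for the first zero balance, deriving the correctness flag from the running minimum of the table instead of from failed stack pops.
import Mathlib
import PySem

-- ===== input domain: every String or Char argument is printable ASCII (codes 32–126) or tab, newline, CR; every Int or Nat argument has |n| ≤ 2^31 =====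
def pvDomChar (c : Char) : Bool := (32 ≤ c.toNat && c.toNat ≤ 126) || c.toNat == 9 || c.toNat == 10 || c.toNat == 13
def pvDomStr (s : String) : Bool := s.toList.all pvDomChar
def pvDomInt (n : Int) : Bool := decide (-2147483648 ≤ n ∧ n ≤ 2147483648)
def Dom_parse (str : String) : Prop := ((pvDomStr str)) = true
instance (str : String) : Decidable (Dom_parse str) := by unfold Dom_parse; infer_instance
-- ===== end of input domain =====

-- B replaces A's single stack-based early-return pass by building the full running-balance
-- table first and then scanning it (alternative decomposition; same O(n) cost).

-- ===== PORT A =====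
-- for i in range(len(str)): maintain left/right counters, a stack, and correct;
-- return (i+1, correct) at the first point where left == right, else (0, False).
def parseGo : List Char → Int → Int → List Char → Bool → Int → Int × Bool
  | [], _, _, _, _, _ => (0, false)
  | c :: rest, left, right, stack, correct, i =>
    if c = '(' then
      if left + 1 = right then (i + 1, correct)
      else parseGo rest (left + 1) right ('(' :: stack) correct (i + 1)
    else
      match stack with
      | [] =>
        if left = right + 1 then (i + 1, false)
        else parseGo rest left (right + 1) [] false (i + 1)
      | _ :: s =>
        if left = right + 1 then (i + 1, correct)
        else parseGo rest left (right + 1) s correct (i + 1)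

def parse (str : String) : Int × Bool := parseGo str.toList 0 0 [] true 0

-- ===== PORT B =====
-- phase 1: the running-balance table
def balances : List Char → Int → List Int
  | [], _ => []
  | c :: rest, b =>
    let b' := b + (if c = '(' then 1 else -1)
    b' :: balances rest b'

-- phase 2: scan for the first zero, tracking the running minimum
def scanBal : List Int → Int → Int → Int × Bool
  | [], _, _ => (0, false)
  | v :: rest, lo, i =>
    let lo' := min lo v
    if v = 0 then (i + 1, decide (0 ≤ lo'))
    else scanBal rest lo' (i + 1)

def parse_alt (str : String) : Int × Bool := scanBal (balances str.toList 0) 0 0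

-- ===== PRECONDITION & SPEC =====
def Spec_parse (str : String) (out : Int × Bool) : Prop := out = parse_alt str
instance (str : String) (out : Int × Bool) : Decidable (Spec_parse str out) := by unfold Spec_parse; infer_instance

-- ===== CLAIM (what is proved, stated in full; the proofs are below) =====
def Claim_equal_parse : Prop := ∀ (str : String), Dom_parse str → Spec_parse str (parse str)

-- ===== LEMMAS AND PROOFS =====

-- Loop invariant: b = left - right, lo ≤ 0, lo ≤ b, stack length = b - lo,
-- and correct holds iff the running minimum never went negative.
theorem parseGo_eq_scanBal (chars : List Char) :
    ∀ (left right b lo i : Int) (stack : List Char) (correct : Bool),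
      left - right = b → lo ≤ 0 → lo ≤ b → (stack.length : Int) = b - lo →
      correct = decide (0 ≤ lo) →
      parseGo chars left right stack correct i = scanBal (balances chars b) lo i := by
  induction chars with
  | nil => intro _ _ _ _ _ _ _ _ _ _ _ _; simp [parseGo, balances, scanBal]
  | cons c rest ih =>
    intro left right b lo i stack correct hb hlo0 hlob hlen hc
    simp only [parseGo, balances, scanBal]
    by_cases hpar : c = '('
    · simp only [if_pos hpar]
      have hmin : min lo (b + 1) = lo := by omega
      by_cases hz : left + 1 = right
      · have : b + 1 = 0 := by omega
        simp [hz, this, hc]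

      · have : ¬ (b + 1 = 0) := by omega
        simp only [if_neg hz, if_neg this, hmin]
        exact ih (left + 1) right (b + 1) lo (i + 1) ('(' :: stack) correct
          (by omega) hlo0 (by omega) (by simp at hlen ⊢; omega) hc
    · simp only [if_neg hpar]
      cases stack with
      | nil =>
        have hble : b = lo := by simp at hlen; omega
        have hmin : min lo (b + -1) = b + -1 := by omega
        by_cases hz : left = right + 1
        · have : b + -1 = 0 := by omega
          omega  -- contradiction: b - 1 = 0 but b = lo ≤ 0
        · have hnz : ¬ (b + -1 = 0) := by omega
          simp only [if_neg hz, if_neg hnz, hmin]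
          exact ih left (right + 1) (b + -1) (b + -1) (i + 1) [] false
            (by omega) (by omega) (by omega) (by simp) (by simp; omega)
      | cons t s =>
        have hlen' : (s.length : Int) = b - lo - 1 := by simp at hlen; omega
        have hmin : min lo (b + -1) = lo := by omega
        by_cases hz : left = right + 1
        · have : b + -1 = 0 := by omega
          simp [hz, this, hc]
        · have hnz : ¬ (b + -1 = 0) := by omega
          simp only [if_neg hz, if_neg hnz, hmin]
          exact ih left (right + 1) (b + -1) lo (i + 1) s correct
            (by omega) hlo0 (by omega) (by omega) hc

-- ===== VERDICT (by name: the statement is the Claim_ definition above) =====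
theorem parse_spec : Claim_equal_parse := by
  intro str _
  unfold Spec_parse parse parse_alt
  exact parseGo_eq_scanBal str.toList 0 0 0 0 0 [] true (by omega) (by omega) (by omega)
    (by simp) (by simp)
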